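-- pv_equiv track=rewrite | github.com/camiiutd/algo1_2k24_1C | 2cuatri/python/parciales/funcionesfundamentales.py | lista_de_maximos
-- ===== SOURCE A (Python) =====
-- def lista_de_maximos(l: list[int]) -> list[tuple[int, int]]:
--     res: list[tuple[int, int]] = []
--     inicio: int = -1  # Valor especial que indica "sin racha activa"
--
--     for i in range(len(l)):
--         if 0 < l[i] <= 61:  # Tiempo válido
--             if inicio == -1:  # Iniciar una nueva racha
--                 inicio = i
--         else:
--             if inicio != -1:  # Fin de la racha
--                 res.append((inicio, i - 1))
--                 inicio = -1  # Reiniciar para indicar "sin racha activa"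
--
--     # Verificar si al final de la lista hay una racha válida
--     if inicio != -1:
--         res.append((inicio, len(l) - 1))
--
--     return res
-- ===== SOURCE B (Python) =====
-- def lista_de_maximos(l: list[int]) -> list[tuple[int, int]]:
--     flags = [0 < x <= 61 for x in l]
--     res: list[tuple[int, int]] = []
--     cursor = 0
--     n = len(flags)
--     while cursor < n:
--         k = flags[cursor]
--         end = cursor + 1
--         while end < n and flags[end] == k:
--             end += 1
--         if k:
--             res.append((cursor, end - 1))
--         cursor = end
--     return res
-- ===== Notes on version B (the rewrite author's own statement) =====
-- stated objective: alternative
-- what changed: Replaced the -1-sentinel state machine with end-of-list flush by a run-based traversal: map each element to a validity flag, then scan whole consecutive runs of equal flags, emitting (start, end) for each True run.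
import Mathlib
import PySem

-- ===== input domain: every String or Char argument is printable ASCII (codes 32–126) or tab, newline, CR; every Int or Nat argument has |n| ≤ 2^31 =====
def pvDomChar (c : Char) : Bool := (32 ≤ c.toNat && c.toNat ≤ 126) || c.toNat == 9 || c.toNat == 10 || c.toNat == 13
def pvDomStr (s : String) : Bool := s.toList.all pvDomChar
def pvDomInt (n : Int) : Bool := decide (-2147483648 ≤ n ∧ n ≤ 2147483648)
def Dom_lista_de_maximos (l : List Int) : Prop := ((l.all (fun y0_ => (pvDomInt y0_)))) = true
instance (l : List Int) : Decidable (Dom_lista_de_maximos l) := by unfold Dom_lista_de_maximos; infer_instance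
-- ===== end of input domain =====

-- B replaces A's -1-sentinel state machine (with end-of-list flush) by a run-based scan over
-- validity flags; same O(n) cost, alternative structure.

-- ===== PORT A =====
-- A's for-loop: state (res, inicio), index counter i; branches in A's order.
def pvALoop : List Int → Int → List (Int × Int) → Int → (List (Int × Int) × Int)
  | [], _, res, inicio => (res, inicio)
  | x :: xs, i, res, inicio =>
    if 0 < x ∧ x ≤ 61 then
      pvALoop xs (i + 1) res (if inicio = -1 then i else inicio)
    else
      if inicio ≠ -1 then pvALoop xs (i + 1) (res ++ [(inicio, i - 1)]) (-1)
      else pvALoop xs (i + 1) res inicio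

def lista_de_maximos (l : List Int) : List (Int × Int) :=
  let st := pvALoop l 0 [] (-1)
  if st.2 ≠ -1 then st.1 ++ [(st.2, (l.length : Int) - 1)] else st.1

-- ===== PORT B =====
def pvFlag (x : Int) : Bool := decide (0 < x ∧ x ≤ 61)

-- B's outer while-loop over runs; the inner while (advancing `end`) is the takeWhile scan.
def pvBGo : List Bool → Int → List (Int × Int)
  | [], _ => []
  | k :: rest, c =>
    let n : Int := 1 + (rest.takeWhile (· == k)).length
    (if k then [(c, c + n - 1)] else []) ++ pvBGo (rest.dropWhile (· == k)) (c + n)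
termination_by f _ => f.length
decreasing_by
  simpa using Nat.lt_succ_of_le (List.length_dropWhile_le _ _)

def lista_de_maximos_alt (l : List Int) : List (Int × Int) :=
  pvBGo (l.map pvFlag) 0

-- ===== PRECONDITION & SPEC =====
def Spec_lista_de_maximos (l : List Int) (out : List (Int × Int)) : Prop := out = lista_de_maximos_alt l
instance (l : List Int) (out : List (Int × Int)) : Decidable (Spec_lista_de_maximos l out) := by unfold Spec_lista_de_maximos; infer_instance

-- ===== CLAIM (what is proved, stated in full; the proofs are below) =====
def Claim_equal_lista_de_maximos : Prop := ∀ (l : List Int), Dom_lista_de_maximos l → Spec_lista_de_maximos l (lista_de_maximos l)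

-- ===== LEMMAS AND PROOFS =====

-- A's loop followed by the final flush, with the end index expressed from the start offset c.
def pvAFin (l : List Int) (c : Int) (res : List (Int × Int)) (s : Int) : List (Int × Int) :=
  let st := pvALoop l c res s
  if st.2 ≠ -1 then st.1 ++ [(st.2, c + l.length - 1)] else st.1

-- One-element-at-a-time normal forms of B's grouped scan: gFin = no active streak, actFin =
-- streak open since index s.
mutual
def pvGFin : List Bool → Int → List (Int × Int)
  | [], _ => []
  | true :: rest, c => pvActFin rest (c + 1) c
  | false :: rest, c => pvGFin rest (c + 1)
def pvActFin : List Bool → Int → Int → List (Int × Int)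
  | [], c, s => [(s, c - 1)]
  | true :: rest, c, s => pvActFin rest (c + 1) s
  | false :: rest, c, s => (s, c - 1) :: pvGFin rest (c + 1)
end

theorem pvAFin_eq (l : List Int) :
    (∀ c res s, 0 ≤ c → s ≠ -1 → pvAFin l c res s = res ++ pvActFin (l.map pvFlag) c s) ∧
    (∀ c res, 0 ≤ c → pvAFin l c res (-1) = res ++ pvGFin (l.map pvFlag) c) := by
  induction l with
  | nil =>
    constructor
    · intro c res s _ hs
      simp [pvAFin, pvALoop, pvActFin, hs]
    · intro c res _
      simp [pvAFin, pvALoop, pvGFin]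
  | cons x xs ih =>
    have harith : ∀ c : Int, c + (x :: xs).length - 1 = (c + 1) + xs.length - 1 := by
      intro c; simp; ring
    constructor
    · intro c res s hc hs
      by_cases hx : 0 < x ∧ x ≤ 61
      · have : pvAFin (x :: xs) c res s = pvAFin xs (c + 1) res s := by
          simp [pvAFin, pvALoop, hx, hs]
          ring_nf
        rw [this, (ih).1 (c + 1) res s (by omega) hs]
        simp [pvFlag, hx, pvActFin]
      · have : pvAFin (x :: xs) c res s = pvAFin xs (c + 1) (res ++ [(s, c - 1)]) (-1) := by
          simp [pvAFin, pvALoop, hx, hs]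
          ring_nf
        rw [this, (ih).2 (c + 1) (res ++ [(s, c - 1)]) (by omega)]
        simp [pvFlag, hx, pvActFin]
    · intro c res hc
      by_cases hx : 0 < x ∧ x ≤ 61
      · have hcne : c ≠ -1 := by omega
        have : pvAFin (x :: xs) c res (-1) = pvAFin xs (c + 1) res c := by
          simp [pvAFin, pvALoop, hx]
          ring_nf
        rw [this, (ih).1 (c + 1) res c (by omega) hcne]
        simp [pvFlag, hx, pvGFin]
      · have : pvAFin (x :: xs) c res (-1) = pvAFin xs (c + 1) res (-1) := by
          simp [pvAFin, pvALoop, hx]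
          ring_nf
        rw [this, (ih).2 (c + 1) res (by omega)]
        simp [pvFlag, hx, pvGFin]

-- Skipping a false run one element at a time.
theorem pvGFin_drop_false : ∀ (f : List Bool) (c : Int),
    pvGFin f c = pvGFin (f.dropWhile (· == false)) (c + (f.takeWhile (· == false)).length) := by
  intro f
  induction f with
  | nil => intro c; simp [List.takeWhile, List.dropWhile]
  | cons k rest ih =>
    intro c
    cases k with
    | true => simp [List.takeWhile, List.dropWhile]
    | false =>
      simp only [List.takeWhile, List.dropWhile]
      rw [pvGFin, ih (c + 1)]
      congr 1
      simp
      ring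

-- Consuming a true run one element at a time.
theorem pvActFin_take_true : ∀ (f : List Bool) (c s : Int),
    pvActFin f c s = (s, c + (f.takeWhile (· == true)).length - 1) ::
      pvGFin (f.dropWhile (· == true)) (c + (f.takeWhile (· == true)).length) := by
  intro f
  induction f with
  | nil => intro c s; simp [pvActFin, pvGFin]
  | cons k rest ih =>
    intro c s
    cases k with
    | true =>
      rw [pvActFin, ih (c + 1) s]
      have h1 : ((true :: rest).takeWhile (· == true)) = true :: rest.takeWhile (· == true) := by simp
      have h2 : ((true :: rest).dropWhile (· == true)) = rest.dropWhile (· == true) := by simp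
      rw [h1, h2]
      rw [show c + ((true :: rest.takeWhile (· == true)).length : Int)
            = (c + 1) + (rest.takeWhile (· == true)).length from by simp; ring]
    | false =>
      simp [pvActFin, pvGFin]

theorem pvGFin_eq_pvBGo : ∀ (n : Nat) (f : List Bool), f.length ≤ n → ∀ c, pvGFin f c = pvBGo f c := by
  intro n
  induction n with
  | zero =>
    intro f hf c
    have : f = [] := List.length_eq_zero_iff.mp (Nat.le_zero.mp hf)
    subst this; simp [pvGFin, pvBGo]
  | succ m ih =>
    intro f hf c
    cases f with
    | nil => simp [pvGFin, pvBGo]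
    | cons k rest =>
      have hlen : (rest.dropWhile (· == k)).length ≤ m := by
        have := List.length_dropWhile_le (· == k) rest
        simp at hf; omega
      cases k with
      | true =>
        rw [pvGFin, pvActFin_take_true, pvBGo]
        rw [ih _ hlen]
        rw [show c + (1 + ((rest.takeWhile (· == true)).length : Int))
              = (c + 1) + (rest.takeWhile (· == true)).length from by ring]
        simp
      | false =>
        rw [pvGFin, pvGFin_drop_false rest (c + 1), pvBGo]
        rw [ih _ hlen]
        rw [show c + (1 + ((rest.takeWhile (· == false)).length : Int))
              = (c + 1) + (rest.takeWhile (· == false)).length from by ring]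
        simp

-- ===== VERDICT (by name: the statement is the Claim_ definition above) =====
theorem lista_de_maximos_spec : Claim_equal_lista_de_maximos := by
  intro l _
  unfold Spec_lista_de_maximos
  have h1 : lista_de_maximos l = pvAFin l 0 [] (-1) := by
    simp [lista_de_maximos, pvAFin]
  rw [h1, (pvAFin_eq l).2 0 [] le_rfl, pvGFin_eq_pvBGo (l.map pvFlag).length _ le_rfl 0]
  rfl
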